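-- pv_equiv track=rewrite | github.com/chetna529/robot-assistance- | robot-assistance-/Backend/app/services/meeting_calendar_service.py | normalize_weekdays
-- ===== SOURCE A (Python) =====
-- _WEEKDAY_INDEX = {
--     "MO": 0,
--     "TU": 1,
--     "WE": 2,
--     "TH": 3,
--     "FR": 4,
--     "SA": 5,
--     "SU": 6,
-- }
--
-- _WEEKDAY_ALIASES = {
--     "MON": "MO",
--     "MONDAY": "MO",
--     "TUE": "TU",
--     "TUES": "TU",
--     "TUESDAY": "TU",
--     "WED": "WE",
--     "WEDNESDAY": "WE",
--     "THU": "TH",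
--     "THUR": "TH",
--     "THURSDAY": "TH",
--     "FRI": "FR",
--     "FRIDAY": "FR",
--     "SAT": "SA",
--     "SATURDAY": "SA",
--     "SUN": "SU",
--     "SUNDAY": "SU",
-- }
--
-- def normalize_weekdays(values: list[str] | None) -> list[str]:
--     if not values:
--         return []
--
--     normalized: list[str] = []
--     for item in values:
--         token = str(item).strip().upper()
--         token = _WEEKDAY_ALIASES.get(token, token)
--         if token not in _WEEKDAY_INDEX:
--             raise ValueError("recurrence_by_weekday must use MO,TU,WE,TH,FR,SA,SU")
--         normalized.append(token)
--
--     ordered_unique = sorted(set(normalized), key=lambda day: _WEEKDAY_INDEX[day])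
--     return ordered_unique
-- ===== SOURCE B (Python) =====
-- _WEEKDAY_TO_INDEX = {
--     "MO": 0, "MON": 0, "MONDAY": 0,
--     "TU": 1, "TUE": 1, "TUES": 1, "TUESDAY": 1,
--     "WE": 2, "WED": 2, "WEDNESDAY": 2,
--     "TH": 3, "THU": 3, "THUR": 3, "THURSDAY": 3,
--     "FR": 4, "FRI": 4, "FRIDAY": 4,
--     "SA": 5, "SAT": 5, "SATURDAY": 5,
--     "SU": 6, "SUN": 6, "SUNDAY": 6,
-- }
--
-- _WEEKDAY_CODES = ["MO", "TU", "WE", "TH", "FR", "SA", "SU"]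
--
--
-- def normalize_weekdays(values):
--     if not values:
--         return []
--
--     mask = 0
--     for item in values:
--         idx = _WEEKDAY_TO_INDEX.get(str(item).strip().upper())
--         if idx is None:
--             raise ValueError("recurrence_by_weekday must use MO,TU,WE,TH,FR,SA,SU")
--         mask |= 1 << idx
--
--     return [code for i, code in enumerate(_WEEKDAY_CODES) if mask >> i & 1]
-- ===== Notes on version B (the rewrite author's own statement) =====
-- stated objective: alternative
-- what changed: B merges the alias and canonical tables into one token-to-weekday-index dict, accumulates the distinct valid days as a 7-bit integer bitmask in a single pass, and emits the result by testing each bit while enumerating the fixed canonical code list, replacing A's list accumulation, set construction and sorted(..., key=index-lambda).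
import Mathlib
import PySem

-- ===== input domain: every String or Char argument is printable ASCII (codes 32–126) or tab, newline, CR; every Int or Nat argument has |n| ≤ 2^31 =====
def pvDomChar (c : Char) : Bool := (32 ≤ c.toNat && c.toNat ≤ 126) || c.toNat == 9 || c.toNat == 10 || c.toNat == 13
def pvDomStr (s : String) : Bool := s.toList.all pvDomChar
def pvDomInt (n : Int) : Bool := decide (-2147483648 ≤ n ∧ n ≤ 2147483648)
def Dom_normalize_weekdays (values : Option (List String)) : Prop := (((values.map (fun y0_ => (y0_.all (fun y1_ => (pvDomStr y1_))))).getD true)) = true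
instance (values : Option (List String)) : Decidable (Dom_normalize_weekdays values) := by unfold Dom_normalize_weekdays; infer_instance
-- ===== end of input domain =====

-- ===== PORT A =====
-- B replaces A's list accumulation + set + sorted(..., key=index) by a single merged
-- token→index dict, a 7-bit integer bitmask of the days seen, and a bit-test emission
-- pass over the fixed canonical code list (alternative decomposition, same cost).
-- Pre_ excludes exactly the inputs on which A raises ValueError (an unknown weekday token).

def pvWeekdayIndex : PySem.Dict String Int :=
  PySem.Dict.mk [("MO", 0), ("TU", 1), ("WE", 2), ("TH", 3), ("FR", 4), ("SA", 5), ("SU", 6)]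

def pvWeekdayAliases : PySem.Dict String String :=
  PySem.Dict.mk [("MON", "MO"), ("MONDAY", "MO"), ("TUE", "TU"), ("TUES", "TU"),
    ("TUESDAY", "TU"), ("WED", "WE"), ("WEDNESDAY", "WE"), ("THU", "TH"), ("THUR", "TH"),
    ("THURSDAY", "TH"), ("FRI", "FR"), ("FRIDAY", "FR"), ("SAT", "SA"), ("SATURDAY", "SA"),
    ("SUN", "SU"), ("SUNDAY", "SU")]

-- A's validation/accumulation loop; none = the ValueError branch
def pvLoopA : List String → List String → Option (List String)
  | [], normalized => some normalized
  | item :: rest, normalized =>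
    -- token = str(item).strip().upper(); token = _WEEKDAY_ALIASES.get(token, token)
    let token := PySem.Str.upper (PySem.Str.strip item)
    let token := PySem.Dict.getD pvWeekdayAliases token token
    if pvWeekdayIndex.contains token then pvLoopA rest (normalized ++ [token]) else none

def normalize_weekdays (values : Option (List String)) : List String :=
  match values with
  | none => []
  | some vs =>
    if vs = [] then []
    else
      match pvLoopA vs [] with
      | none => []  -- ValueError; excluded by Pre_
      | some normalized =>
        PySem.List.sorted (PySem.Set.ofList normalized)
          (fun day => PySem.Dict.getD pvWeekdayIndex day 0) false

-- ===== PORT B =====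
def pvWeekdayToIdx : PySem.Dict String Nat :=
  PySem.Dict.mk [("MO", 0), ("MON", 0), ("MONDAY", 0),
    ("TU", 1), ("TUE", 1), ("TUES", 1), ("TUESDAY", 1),
    ("WE", 2), ("WED", 2), ("WEDNESDAY", 2),
    ("TH", 3), ("THU", 3), ("THUR", 3), ("THURSDAY", 3),
    ("FR", 4), ("FRI", 4), ("FRIDAY", 4),
    ("SA", 5), ("SAT", 5), ("SATURDAY", 5),
    ("SU", 6), ("SUN", 6), ("SUNDAY", 6)]

def pvWeekdayCodes : List String := ["MO", "TU", "WE", "TH", "FR", "SA", "SU"]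

-- B's loop: mask |= 1 << idx; none = the same ValueError
def pvMaskLoop : List String → Nat → Option Nat
  | [], mask => some mask
  | item :: rest, mask =>
    match pvWeekdayToIdx.get? (PySem.Str.upper (PySem.Str.strip item)) with
    | none => none
    | some idx => pvMaskLoop rest (mask ||| (1 <<< idx))

def normalize_weekdays_alt (values : Option (List String)) : List String :=
  match values with
  | none => []
  | some vs =>
    if vs = [] then []
    else
      match pvMaskLoop vs 0 with
      | none => []  -- ValueError; excluded by Pre_
      | some mask =>
        ((PySem.List.enumerate pvWeekdayCodes).filter
          (fun p => (mask >>> p.1.toNat) &&& 1 == 1)).map (·.2)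

-- ===== PRECONDITION & SPEC =====
-- Pre_ excludes exactly the inputs on which A raises ValueError: some item whose
-- stripped/uppercased/alias-resolved token is not a weekday code (B raises the identical ValueError there).
def Pre_normalize_weekdays (values : Option (List String)) : Prop :=
  (values.getD []).all (fun item =>
    let token := PySem.Str.upper (PySem.Str.strip item)
    pvWeekdayIndex.contains (PySem.Dict.getD pvWeekdayAliases token token)) = true
instance (values : Option (List String)) : Decidable (Pre_normalize_weekdays values) := by
  unfold Pre_normalize_weekdays; infer_instance

def pvWitness_normalize_weekdays : Option (List String) := some ["Monday", " tue ", "MO", "FRI"]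

def Spec_normalize_weekdays (values : Option (List String)) (out : List String) : Prop := out = normalize_weekdays_alt values
instance (values : Option (List String)) (out : List String) : Decidable (Spec_normalize_weekdays values out) := by unfold Spec_normalize_weekdays; infer_instance

-- ===== CLAIM (what is proved, stated in full; the proofs are below) =====
def Claim_equal_normalize_weekdays : Prop := ∀ (values : Option (List String)), Dom_normalize_weekdays values → Pre_normalize_weekdays values → Spec_normalize_weekdays values (normalize_weekdays values)

-- ===== LEMMAS AND PROOFS =====

-- A's normalized token of an item (proof-side abbreviation)
def pvNorm (item : String) : String :=
  let token := PySem.Str.upper (PySem.Str.strip item)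
  PySem.Dict.getD pvWeekdayAliases token token

-- bridge: B's one merged lookup = position (in the canonical list) of A's alias-resolved token
lemma pv_bridge (t : String) :
    pvWeekdayToIdx.get? t
      = pvWeekdayCodes.idxOf? (PySem.Dict.getD pvWeekdayAliases t t) := by
  by_cases h0 : t = "MON"
  · subst h0; decide
  by_cases h1 : t = "MONDAY"
  · subst h1; decide
  by_cases h2 : t = "TUE"
  · subst h2; decide
  by_cases h3 : t = "TUES"
  · subst h3; decide
  by_cases h4 : t = "TUESDAY"
  · subst h4; decide
  by_cases h5 : t = "WED"
  · subst h5; decide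
  by_cases h6 : t = "WEDNESDAY"
  · subst h6; decide
  by_cases h7 : t = "THU"
  · subst h7; decide
  by_cases h8 : t = "THUR"
  · subst h8; decide
  by_cases h9 : t = "THURSDAY"
  · subst h9; decide
  by_cases h10 : t = "FRI"
  · subst h10; decide
  by_cases h11 : t = "FRIDAY"
  · subst h11; decide
  by_cases h12 : t = "SAT"
  · subst h12; decide
  by_cases h13 : t = "SATURDAY"
  · subst h13; decide
  by_cases h14 : t = "SUN"
  · subst h14; decide
  by_cases h15 : t = "SUNDAY"
  · subst h15; decide
  by_cases h16 : t = "MO"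
  · subst h16; decide
  by_cases h17 : t = "TU"
  · subst h17; decide
  by_cases h18 : t = "WE"
  · subst h18; decide
  by_cases h19 : t = "TH"
  · subst h19; decide
  by_cases h20 : t = "FR"
  · subst h20; decide
  by_cases h21 : t = "SA"
  · subst h21; decide
  by_cases h22 : t = "SU"
  · subst h22; decide
  simp_all [pvWeekdayToIdx, pvWeekdayAliases, pvWeekdayCodes, PySem.Dict.get?,
    PySem.Dict.getD, List.idxOf?, List.findIdx?, List.findIdx?.go, beq_iff_eq, Ne.symm]

lemma pv_valid_iff (t : String) :
    pvWeekdayIndex.contains t = true ↔ t ∈ pvWeekdayCodes := by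
  simp [pvWeekdayIndex, pvWeekdayCodes, PySem.Dict.contains_mk]
  tauto

lemma pvLoopA_eq (l : List String) (acc : List String)
    (h : ∀ item ∈ l, pvWeekdayIndex.contains (pvNorm item) = true) :
    pvLoopA l acc = some (acc ++ l.map pvNorm) := by
  induction l generalizing acc with
  | nil => simp [pvLoopA]
  | cons x xs ih =>
    have hx := h x (by simp)
    simp only [pvLoopA]
    rw [show (PySem.Dict.getD pvWeekdayAliases (PySem.Str.upper (PySem.Str.strip x))
        (PySem.Str.upper (PySem.Str.strip x))) = pvNorm x from rfl, hx, if_pos rfl]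
    rw [ih (acc ++ [pvNorm x]) (fun i hi => h i (by simp [hi]))]
    simp [pvNorm]

lemma pv_idxOf?_mem (l : List String) (x : String) (h : x ∈ l) :
    l.idxOf? x = some (l.idxOf x) := by
  have hs : (l.idxOf? x).isSome := by
    rw [← PySem.List.index?_eq_idxOf?]
    exact (PySem.List.index?_isSome_iff l x).mpr h
  obtain ⟨k, hk⟩ := Option.isSome_iff_exists.mp hs
  rw [hk, List.idxOf_eq_getD_idxOf?, hk, Option.getD_some]

lemma pvMaskLoop_eq (l : List String) (m : Nat)
    (h : ∀ item ∈ l, pvWeekdayIndex.contains (pvNorm item) = true) :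
    pvMaskLoop l m
      = some (l.foldl (fun m i => m ||| (1 <<< (pvWeekdayCodes.idxOf (pvNorm i)))) m) := by
  induction l generalizing m with
  | nil => simp [pvMaskLoop]
  | cons x xs ih =>
    have hx : pvNorm x ∈ pvWeekdayCodes := (pv_valid_iff _).mp (h x (by simp))
    have hidx : pvWeekdayToIdx.get? (PySem.Str.upper (PySem.Str.strip x))
        = some (pvWeekdayCodes.idxOf (pvNorm x)) := by
      rw [pv_bridge]
      exact pv_idxOf?_mem _ _ hx
    simp only [pvMaskLoop, hidx]
    exact ih _ (fun i hi => h i (by simp [hi]))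

-- bit i of the accumulated mask says whether some item normalizes to code index i
lemma pv_mask_testBit (l : List String) (m : Nat) (i : Nat) :
    (l.foldl (fun m it => m ||| (1 <<< (pvWeekdayCodes.idxOf (pvNorm it)))) m).testBit i
      = (m.testBit i || l.any (fun it => pvWeekdayCodes.idxOf (pvNorm it) == i)) := by
  induction l generalizing m with
  | nil => simp
  | cons x xs ih =>
    simp only [List.foldl_cons, List.any_cons, ih, Nat.testBit_or]
    have : ((1 <<< pvWeekdayCodes.idxOf (pvNorm x)).testBit i)
        = (pvWeekdayCodes.idxOf (pvNorm x) == i) := by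
      simp [Nat.shiftLeft_eq, Nat.testBit_two_pow, Bool.beq_eq_decide_eq]
    rw [this]
    cases m.testBit i <;> cases (pvWeekdayCodes.idxOf (pvNorm x) == i) <;> simp

-- the heart of the A side: sorting the set of valid tokens by weekday index is exactly
-- filtering the canonical ordered list by membership in that set
lemma pv_sorted_eq_filter (toks : List String)
    (h : ∀ t ∈ toks, pvWeekdayIndex.contains t = true) :
    PySem.List.sorted (PySem.Set.ofList toks)
        (fun day => PySem.Dict.getD pvWeekdayIndex day 0) false
      = pvWeekdayCodes.filter (fun day => PySem.Set.contains (PySem.Set.ofList toks) day) := by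
  apply PySem.List.sorted_eq_of_perm_of_pairwise_lt
  · rw [List.perm_ext_iff_of_nodup]
    · intro a
      simp only [List.mem_filter, PySem.Set.contains_iff, PySem.Set.mem_ofList]
      constructor
      · exact fun h => h.2
      · intro ha
        exact ⟨(pv_valid_iff a).mp (h a ha), ha⟩
    · exact List.Nodup.filter _ (by decide)
    · exact PySem.Set.nodup_ofList toks
  · have hp : pvWeekdayCodes.Pairwise
        (fun a b => pvWeekdayIndex.getD a 0 < pvWeekdayIndex.getD b 0) := by decide
    exact List.Pairwise.sublist List.filter_sublist hp

-- the heart of the B side: bit i of the mask = membership of the i-th code in the token set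
lemma pv_bit_eq (vs : List String)
    (h : ∀ item ∈ vs, pvWeekdayIndex.contains (pvNorm item) = true)
    (i : Nat) (c : String) (hc : pvWeekdayCodes.idxOf c = i) :
    (((vs.foldl (fun m it => m ||| (1 <<< (pvWeekdayCodes.idxOf (pvNorm it)))) 0) >>> i) &&& 1 == 1)
      = PySem.Set.contains (PySem.Set.ofList (vs.map pvNorm)) c := by
  have hbit : (((vs.foldl (fun m it => m ||| (1 <<< (pvWeekdayCodes.idxOf (pvNorm it)))) 0) >>> i) &&& 1 == 1)
      = (vs.foldl (fun m it => m ||| (1 <<< (pvWeekdayCodes.idxOf (pvNorm it)))) 0).testBit i := by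
    simp [Nat.testBit, Nat.and_comm]
  rw [hbit, pv_mask_testBit, Nat.zero_testBit, Bool.false_or]
  rw [Bool.eq_iff_iff]
  simp only [List.any_eq_true, beq_iff_eq, PySem.Set.contains_iff, PySem.Set.mem_ofList,
    List.mem_map]
  constructor
  · rintro ⟨it, hit, hidx⟩
    refine ⟨it, hit, ?_⟩
    have hm : pvNorm it ∈ pvWeekdayCodes := (pv_valid_iff _).mp (h it hit)
    exact (List.idxOf_inj hm).mp (by rw [hidx, hc])
  · rintro ⟨it, hit, hn⟩
    exact ⟨it, hit, by rw [hn, hc]⟩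

-- ===== VERDICT (by name: the statement is the Claim_ definition above) =====
theorem normalize_weekdays_spec : Claim_equal_normalize_weekdays := by
  intro values _ hpre
  unfold Spec_normalize_weekdays
  match values with
  | none => rfl
  | some vs =>
    by_cases hnil : vs = []
    · simp [normalize_weekdays, normalize_weekdays_alt, hnil]
    · have hall : ∀ item ∈ vs, pvWeekdayIndex.contains (pvNorm item) = true := by
        intro i hi
        unfold Pre_normalize_weekdays at hpre
        simp only [Option.getD_some, List.all_eq_true] at hpre
        simpa [pvNorm] using hpre i hi
      have hA := pvLoopA_eq vs [] hall
      have hB := pvMaskLoop_eq vs 0 hall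
      simp only [normalize_weekdays, normalize_weekdays_alt, hnil, hA, hB]
      rw [List.nil_append]
      rw [pv_sorted_eq_filter (vs.map pvNorm) (by
        intro t ht
        rcases List.mem_map.mp ht with ⟨i, hi, rfl⟩
        exact hall i hi)]
      have h0 := pv_bit_eq vs hall 0 "MO" (by decide)
      have h1 := pv_bit_eq vs hall 1 "TU" (by decide)
      have h2 := pv_bit_eq vs hall 2 "WE" (by decide)
      have h3 := pv_bit_eq vs hall 3 "TH" (by decide)
      have h4 := pv_bit_eq vs hall 4 "FR" (by decide)
      have h5 := pv_bit_eq vs hall 5 "SA" (by decide)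
      have h6 := pv_bit_eq vs hall 6 "SU" (by decide)
      rw [show PySem.List.enumerate pvWeekdayCodes
          = [((0:Int),"MO"),(1,"TU"),(2,"WE"),(3,"TH"),(4,"FR"),(5,"SA"),(6,"SU")] from rfl]
      simp only [List.filter]
      rw [show ((0:Int)).toNat = 0 from rfl, show ((1:Int)).toNat = 1 from rfl,
        show ((2:Int)).toNat = 2 from rfl, show ((3:Int)).toNat = 3 from rfl,
        show ((4:Int)).toNat = 4 from rfl, show ((5:Int)).toNat = 5 from rfl,
        show ((6:Int)).toNat = 6 from rfl] at *
      rw [h0, h1, h2, h3, h4, h5, h6]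
      simp only [pvWeekdayCodes, List.filter]
      cases (PySem.Set.ofList (vs.map pvNorm)).contains "MO" <;>
        cases (PySem.Set.ofList (vs.map pvNorm)).contains "TU" <;>
        cases (PySem.Set.ofList (vs.map pvNorm)).contains "WE" <;>
        cases (PySem.Set.ofList (vs.map pvNorm)).contains "TH" <;>
        cases (PySem.Set.ofList (vs.map pvNorm)).contains "FR" <;>
        cases (PySem.Set.ofList (vs.map pvNorm)).contains "SA" <;>
        cases (PySem.Set.ofList (vs.map pvNorm)).contains "SU" <;> rfl
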